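-- pv_equiv track=rewrite | github.com/Gilmore3088/feeschedule-hub | fee_crawler/agents/discover.py | _score_pdf_links
-- ===== SOURCE A (Python) =====
-- def _score_pdf_links(pdf_urls: list[str]) -> list[str]:
--     """Score PDF links by likelihood of being a fee schedule. Return sorted."""
--     fee_keywords = ["fee", "schedule", "service-charge", "truth-in-savings", "disclosure", "pricing"]
--     non_fee = ["privacy", "loan", "mortgage", "annual-report", "cra", "complaint", "application", "enrollment"]
--
--     scored = []
--     for url in pdf_urls:
--         lower = url.lower()
--         if any(kw in lower for kw in non_fee):
--             continue
--         score = sum(1 for kw in fee_keywords if kw in lower)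
--         if score > 0:
--             scored.append((score, url))
--
--     scored.sort(key=lambda x: x[0], reverse=True)
--     return [url for _, url in scored]
-- ===== SOURCE B (Python) =====
-- def _score_pdf_links(pdf_urls: list[str]) -> list[str]:
--     """Bucket-by-score traversal: emit urls for each score 6..1 in input order (no sort)."""
--     fee_keywords = ["fee", "schedule", "service-charge", "truth-in-savings", "disclosure", "pricing"]
--     non_fee = ["privacy", "loan", "mortgage", "annual-report", "cra", "complaint", "application", "enrollment"]
--
--     def _score(url: str) -> int:
--         lower = url.lower()
--         if any(kw in lower for kw in non_fee):
--             return 0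
--         return sum(1 for kw in fee_keywords if kw in lower)
--
--     return [url for want in range(6, 0, -1) for url in pdf_urls if _score(url) == want]
-- ===== Notes on version B (the rewrite author's own statement) =====
-- stated objective: alternative
-- what changed: B removes the score-tag-and-stable-sort: instead of collecting (score,url) pairs and sorting them by score descending, it emits the urls in six bucket passes, one per score from 6 down to 1, each pass keeping input order.
import Mathlib
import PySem

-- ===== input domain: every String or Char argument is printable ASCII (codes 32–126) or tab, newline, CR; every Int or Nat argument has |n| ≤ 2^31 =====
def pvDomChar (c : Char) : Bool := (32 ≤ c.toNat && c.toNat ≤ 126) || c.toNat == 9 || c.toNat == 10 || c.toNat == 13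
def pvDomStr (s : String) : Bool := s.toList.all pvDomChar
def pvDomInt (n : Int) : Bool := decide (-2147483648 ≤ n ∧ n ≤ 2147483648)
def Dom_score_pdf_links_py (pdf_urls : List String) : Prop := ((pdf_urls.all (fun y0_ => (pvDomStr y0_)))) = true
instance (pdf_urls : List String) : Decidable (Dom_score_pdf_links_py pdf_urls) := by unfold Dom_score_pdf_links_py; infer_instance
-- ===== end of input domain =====

-- B replaces the score-tag-and-stable-sort of A by six bucket passes (scores 6 down to 1,
-- each pass keeping input order), removing the sort entirely (objective: alternative).

-- ===== PORT A =====
def pvFeeKeywords : List String :=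
  ["fee", "schedule", "service-charge", "truth-in-savings", "disclosure", "pricing"]
def pvNonFee : List String :=
  ["privacy", "loan", "mortgage", "annual-report", "cra", "complaint", "application", "enrollment"]

def score_pdf_links_py (pdf_urls : List String) : List String :=
  let scored : List (Int × String) := pdf_urls.foldl (fun scored url =>
    let lower := PySem.Str.lower url
    if pvNonFee.any (fun kw => PySem.Str.isIn kw lower) then scored
    else
      let score : Int := pvFeeKeywords.foldl (fun n kw => if PySem.Str.isIn kw lower then n + 1 else n) 0
      if 0 < score then scored ++ [(score, url)] else scored) []
  (PySem.List.sorted scored (fun x => x.1) true).map (fun p => p.2)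

-- ===== PORT B =====
def pvScore (url : String) : Int :=
  let lower := PySem.Str.lower url
  if pvNonFee.any (fun kw => PySem.Str.isIn kw lower) then 0
  else pvFeeKeywords.foldl (fun n kw => if PySem.Str.isIn kw lower then n + 1 else n) 0

def score_pdf_links_py_alt (pdf_urls : List String) : List String :=
  (PySem.List.pyRange 6 0 (-1)).flatMap (fun want =>
    pdf_urls.filter (fun url => pvScore url == want))

-- ===== PRECONDITION & SPEC =====
def Spec_score_pdf_links_py (pdf_urls : List String) (out : List String) : Prop := out = score_pdf_links_py_alt pdf_urls
instance (pdf_urls : List String) (out : List String) : Decidable (Spec_score_pdf_links_py pdf_urls out) := by unfold Spec_score_pdf_links_py; infer_instance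

-- ===== CLAIM (what is proved, stated in full; the proofs are below) =====
def Claim_equal_score_pdf_links_py : Prop := ∀ (pdf_urls : List String), Dom_score_pdf_links_py pdf_urls → Spec_score_pdf_links_py pdf_urls (score_pdf_links_py pdf_urls)

-- ===== LEMMAS AND PROOFS =====

-- A's inner fold over the keyword list counts at most its length, never below the seed.
theorem pv_count_bounds (kws : List String) (lower : String) (n : Int) :
    n ≤ kws.foldl (fun n kw => if PySem.Str.isIn kw lower then n + 1 else n) n ∧
    kws.foldl (fun n kw => if PySem.Str.isIn kw lower then n + 1 else n) n ≤ n + kws.length := by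
  induction kws generalizing n with
  | nil => simp
  | cons k ks ih =>
    simp only [List.foldl_cons, List.length_cons]
    by_cases h : PySem.Str.isIn k lower = true
    · simp only [h, if_pos]
      obtain ⟨h1, h2⟩ := ih (n + 1)
      constructor
      · omega
      · push_cast; omega
    · simp only [h, if_neg, Bool.false_eq_true, not_false_iff]
      obtain ⟨h1, h2⟩ := ih n
      constructor
      · omega
      · push_cast; omega

theorem pvScore_bounds (url : String) : 0 ≤ pvScore url ∧ pvScore url ≤ 6 := by
  by_cases h : pvNonFee.any (fun kw => PySem.Str.isIn kw (PySem.Str.lower url)) = true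
  · have h0 : pvScore url = 0 := by simp only [pvScore]; rw [if_pos h]
    rw [h0]; omega
  · have h0 : pvScore url = pvFeeKeywords.foldl
        (fun n kw => if PySem.Str.isIn kw (PySem.Str.lower url) then n + 1 else n) 0 := by
      simp only [pvScore]; rw [if_neg h]
    obtain ⟨h1, h2⟩ := pv_count_bounds pvFeeKeywords (PySem.Str.lower url) 0
    have hlen : pvFeeKeywords.length = 6 := rfl
    rw [hlen] at h2
    rw [h0]; push_cast at h2; omega

-- A's accumulation pass produces exactly the (score, url) pairs of the kept urls, in input order.
theorem pv_scored_eq (pdf_urls : List String) (acc : List (Int × String)) :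
    pdf_urls.foldl (fun scored url =>
      let lower := PySem.Str.lower url
      if pvNonFee.any (fun kw => PySem.Str.isIn kw lower) then scored
      else
        let score : Int := pvFeeKeywords.foldl (fun n kw => if PySem.Str.isIn kw lower then n + 1 else n) 0
        if 0 < score then scored ++ [(score, url)] else scored) acc
    = acc ++ (pdf_urls.filter (fun u => decide (0 < pvScore u))).map (fun u => (pvScore u, u)) := by
  induction pdf_urls generalizing acc with
  | nil => simp
  | cons u us ih =>
    simp only [List.foldl_cons]
    by_cases h : pvNonFee.any (fun kw => PySem.Str.isIn kw (PySem.Str.lower u)) = true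
    · have hs : pvScore u = 0 := by simp only [pvScore]; rw [if_pos h]
      rw [if_pos h, ih, List.filter_cons]
      have hd : decide (0 < pvScore u) = false := by rw [hs]; decide
      rw [hd]
      simp
    · have hs : pvScore u =
          pvFeeKeywords.foldl (fun n kw => if PySem.Str.isIn kw (PySem.Str.lower u) then n + 1 else n) 0 := by
        simp only [pvScore]; rw [if_neg h]
      rw [if_neg h]
      by_cases hpos : 0 < pvScore u
      · have hd : decide (0 < pvScore u) = true := by rw [decide_eq_true_eq]; exact hpos
        rw [if_pos (hs ▸ hpos), ih, List.filter_cons, hd, if_pos rfl, List.map_cons,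
          List.append_assoc, List.singleton_append, ← hs]
      · have hd : decide (0 < pvScore u) = false := by simpa using hpos
        rw [if_neg (hs ▸ hpos), ih, List.filter_cons, hd]
        simp

-- insertBy passes over a prefix it does not go before
theorem pv_insertBy_append {α : Type} (before : α → α → Bool) (x : α) (ys zs : List α)
    (h : ∀ y ∈ ys, before x y = false) :
    PySem.List.insertBy before x (ys ++ zs) = ys ++ PySem.List.insertBy before x zs := by
  induction ys with
  | nil => simp
  | cons y ys ih =>
    have hy := h y (by simp)
    simp only [List.cons_append, PySem.List.insertBy, hy, Bool.false_eq_true, if_neg,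
      not_false_iff]
    rw [ih (fun y hy => h y (by simp [hy]))]

-- insertBy goes to the front of a list it goes before everywhere
theorem pv_insertBy_front {α : Type} (before : α → α → Bool) (x : α) (zs : List α)
    (h : ∀ y ∈ zs, before x y = true) :
    PySem.List.insertBy before x zs = x :: zs := by
  cases zs with
  | nil => rfl
  | cons z zs => simp [PySem.List.insertBy, h z (by simp)]

-- inserting a keyed element into buckets concatenated in strictly descending key order
-- appends it to the end of its own bucket.
theorem pv_insert_buckets (scores : List Int)
    (hs : scores.Pairwise (fun a b => b < a)) (x : Int × String) (hx : x.1 ∈ scores)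
    (F : Int → List (Int × String)) (hF : ∀ s, ∀ p ∈ F s, p.1 = s) :
    PySem.List.insertBy (fun a b => decide (b.1 < a.1)) x (scores.flatMap F)
      = scores.flatMap (fun s => F s ++ if x.1 = s then [x] else []) := by
  induction scores with
  | nil => cases hx
  | cons s rest ih =>
    rw [List.pairwise_cons] at hs
    obtain ⟨hall, hrest⟩ := hs
    have hpass : ∀ y ∈ F s, (decide (y.1 < x.1)) = false := by
      intro y hy
      have hy1 := hF s y hy
      rcases List.mem_cons.mp hx with h1 | h1
      · simp [hy1, h1]
      · have := hall _ h1
        simp only [decide_eq_false_iff_not, hy1, not_lt]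
        omega
    simp only [List.flatMap_cons]
    rw [pv_insertBy_append _ _ _ _ hpass]
    rcases List.mem_cons.mp hx with h1 | h1
    · -- x belongs to the first bucket
      have hrest_id : rest.flatMap (fun t => F t ++ if x.1 = t then [x] else [])
          = rest.flatMap F := by
        apply List.flatMap_congr
        intro t ht
        have := hall t ht
        have : x.1 ≠ t := by omega
        simp [this]
      rw [hrest_id]
      have hfront : ∀ y ∈ rest.flatMap F, (decide (y.1 < x.1)) = true := by
        intro y hy
        obtain ⟨t, ht, hyt⟩ := List.mem_flatMap.mp hy
        have := hF t y hyt
        have := hall t ht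
        simp only [decide_eq_true_eq]
        omega
      rw [pv_insertBy_front _ _ _ hfront]
      simp [h1]
    · -- x belongs to a later bucket
      have hxs : x.1 ≠ s := by have := hall _ h1; omega
      rw [ih hrest h1]
      simp [hxs]

-- folding insertBy over a keyed list whose keys lie in a strictly descending score list
-- builds exactly the concatenation of the per-score buckets.
theorem pv_foldl_insertBy_buckets (scores : List Int)
    (hs : scores.Pairwise (fun a b => b < a)) (l : List (Int × String))
    (hl : ∀ p ∈ l, p.1 ∈ scores) :
    l.foldl (fun acc x => PySem.List.insertBy (fun a b => decide (b.1 < a.1)) x acc) []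
      = scores.flatMap (fun s => l.filter (fun p => p.1 == s)) := by
  induction l using List.reverseRecOn with
  | nil => simp
  | append_singleton l x ih =>
    rw [List.foldl_append]
    simp only [List.foldl_cons, List.foldl_nil]
    rw [ih (fun p hp => hl p (by simp [hp]))]
    rw [pv_insert_buckets scores hs x (hl x (by simp))
      (fun s => l.filter (fun p => p.1 == s))
      (fun s p hp => by simpa using (List.of_mem_filter hp))]
    apply List.flatMap_congr
    intro s _
    by_cases h : x.1 = s <;> simp [List.filter_append, h]

-- ===== VERDICT (by name: the statement is the Claim_ definition above) =====
theorem score_pdf_links_py_spec : Claim_equal_score_pdf_links_py := by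
  intro pdf_urls _
  unfold Spec_score_pdf_links_py
  simp only [score_pdf_links_py, score_pdf_links_py_alt]
  rw [PySem.List.sorted_rev_eq_foldl_insertBy, pv_scored_eq]
  set scored := (pdf_urls.filter (fun u => decide (0 < pvScore u))).map (fun u => (pvScore u, u)) with hscored
  have hmem : ∀ p ∈ scored, p.1 ∈ ([6, 5, 4, 3, 2, 1] : List Int) := by
    intro p hp
    obtain ⟨u, hu, rfl⟩ := List.mem_map.mp hp
    have h1 : (0 : Int) < pvScore u := by simpa using List.of_mem_filter hu
    have h2 := pvScore_bounds u
    simp only [List.mem_cons, List.not_mem_nil, or_false]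
    omega
  rw [List.nil_append, pv_foldl_insertBy_buckets [6, 5, 4, 3, 2, 1] (by decide) scored hmem]
  have hrange : PySem.List.pyRange 6 0 (-1) = ([6, 5, 4, 3, 2, 1] : List Int) := by decide
  rw [hrange, List.map_flatMap]
  apply List.flatMap_congr
  intro s hsmem
  have hs1 : (1 : Int) ≤ s := by
    simp only [List.mem_cons, List.not_mem_nil, or_false] at hsmem
    omega
  rw [hscored, List.filter_map, List.map_map]
  have hfe : ((fun (p : Int × String) => p.1 == s) ∘ fun u => (pvScore u, u))
      = fun u => pvScore u == s := by funext u; rfl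
  rw [hfe, List.filter_filter]
  have hpq : ∀ u ∈ pdf_urls, ((pvScore u == s) && decide (0 < pvScore u)) = (pvScore u == s) := by
    intro u _
    by_cases h : pvScore u = s
    · rw [h]
      simp only [beq_self_eq_true, Bool.true_and, decide_eq_true_eq]
      omega
    · simp [h]
  rw [List.filter_congr hpq]
  simp [Function.comp_def]
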